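-- pv_equiv track=rewrite | github.com/Yolloh/match3 | match3.py | _removeMatchesInRow
-- ===== SOURCE A (Python) =====
-- def _removeMatchesInRow(matchLength, row):
--     result = []
--     matchTarget = None
--     currentRun = []
--     for cell in row:
--         if cell == matchTarget:
--             currentRun.append(cell)
--         else:
--             if len(currentRun)  == matchLength:
--                 result += [None]*matchLength
--             else:
--                 result += currentRun
--             currentRun = [ cell]
--             matchTarget = cell
--     if len(currentRun) == matchLength:
--         result += [None]*matchLength
--     else:
--         result += currentRun
--     return result
-- ===== SOURCE B (Python) =====
-- def _removeMatchesInRow(matchLength, row):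
--     # Per-cell classification: a cell is replaced by None iff the maximal run of
--     # equal cells containing it has length exactly matchLength. Run lengths are
--     # computed positionally: left[i] = streak ending at i, right[i] = streak
--     # starting at i, so the run containing i has length left[i] + right[i] - 1.
--     n = len(row)
--     left = [1] * n
--     for i in range(1, n):
--         if row[i] == row[i - 1]:
--             left[i] = left[i - 1] + 1
--     right = [1] * n
--     for i in range(n - 2, -1, -1):
--         if row[i] == row[i + 1]:
--             right[i] = right[i + 1] + 1
--     return [None if left[i] + right[i] - 1 == matchLength else row[i] for i in range(n)]
-- ===== Notes on version B (the rewrite author's own statement) =====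
-- stated objective: alternative
-- what changed: Replaces A's one-pass matchTarget/currentRun state machine with per-cell classification: two directional streak passes (left[i] = streak ending at i, right[i] = streak starting at i) and an elementwise map that blanks a cell iff left[i]+right[i]-1 == matchLength; no runs are materialized.
import Mathlib
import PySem

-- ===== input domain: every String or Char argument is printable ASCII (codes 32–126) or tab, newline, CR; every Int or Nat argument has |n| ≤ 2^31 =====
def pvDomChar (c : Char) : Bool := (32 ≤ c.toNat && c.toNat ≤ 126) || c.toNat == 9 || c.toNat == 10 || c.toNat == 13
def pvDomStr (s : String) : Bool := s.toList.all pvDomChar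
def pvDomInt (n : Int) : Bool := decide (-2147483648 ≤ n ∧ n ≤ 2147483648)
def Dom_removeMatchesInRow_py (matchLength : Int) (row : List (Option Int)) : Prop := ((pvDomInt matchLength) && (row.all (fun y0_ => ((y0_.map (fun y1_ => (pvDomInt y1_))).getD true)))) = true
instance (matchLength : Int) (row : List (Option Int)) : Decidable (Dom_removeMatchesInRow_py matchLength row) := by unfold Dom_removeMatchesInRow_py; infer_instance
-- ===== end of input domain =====

-- B replaces A's one-pass matchTarget/currentRun state machine with per-cell classification
-- via two directional streak passes (objective: alternative algorithm, same O(n) cost).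


-- ===== PORT A =====
-- state = (result, matchTarget, currentRun); one step of A's for-loop body
def aStep (matchLength : Int) (s : List (Option Int) × Option Int × List (Option Int))
    (cell : Option Int) : List (Option Int) × Option Int × List (Option Int) :=
  match s with
  | (result, matchTarget, currentRun) =>
    if cell = matchTarget then
      (result, matchTarget, currentRun ++ [cell])
    else
      ((if (currentRun.length : Int) = matchLength then
          result ++ List.replicate matchLength.toNat none
        else result ++ currentRun), cell, [cell])

-- the final flush after the loop
def aFin (matchLength : Int) (s : List (Option Int) × Option Int × List (Option Int)) :
    List (Option Int) :=
  match s with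
  | (result, _, currentRun) =>
    if (currentRun.length : Int) = matchLength then result ++ List.replicate matchLength.toNat none
    else result ++ currentRun

def removeMatchesInRow_py (matchLength : Int) (row : List (Option Int)) : List (Option Int) :=
  aFin matchLength (row.foldl (aStep matchLength) ([], none, []))

-- ===== PORT B =====
-- forward pass: left[i] = length of the equal streak ending at i
-- (python's index loop 'left[i] = left[i-1]+1 if row[i]==row[i-1] else 1', carried as (prev cell, prev left))
def leftsGo (prev : Option Int) (pl : Nat) : List (Option Int) → List Nat
  | [] => []
  | c :: cs => (if c = prev then pl + 1 else 1) :: leftsGo c (if c = prev then pl + 1 else 1) cs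

def lefts : List (Option Int) → List Nat
  | [] => []
  | c :: cs => 1 :: leftsGo c 1 cs

-- backward pass: right[i] = length of the equal streak starting at i
-- (python's reverse index loop 'right[i] = right[i+1]+1 if row[i]==row[i+1] else 1')
def streaks : List (Option Int) → List Nat
  | [] => []
  | [_] => [1]
  | c :: c2 :: cs => (if c = c2 then (streaks (c2 :: cs)).headD 0 + 1 else 1) :: streaks (c2 :: cs)

-- the final comprehension: blank a cell iff its run length left+right-1 equals matchLength
def bCell (matchLength : Int) (c : Option Int) (lr : Nat × Nat) : Option Int :=
  if ((lr.1 + lr.2 - 1 : Nat) : Int) = matchLength then none else c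

def removeMatchesInRow_py_alt (matchLength : Int) (row : List (Option Int)) : List (Option Int) :=
  List.zipWith (bCell matchLength) row ((lefts row).zip (streaks row))

-- ===== PRECONDITION & SPEC =====
def Spec_removeMatchesInRow_py (matchLength : Int) (row : List (Option Int)) (out : List (Option Int)) : Prop := out = removeMatchesInRow_py_alt matchLength row
instance (matchLength : Int) (row : List (Option Int)) (out : List (Option Int)) : Decidable (Spec_removeMatchesInRow_py matchLength row out) := by unfold Spec_removeMatchesInRow_py; infer_instance

-- ===== CLAIM (what is proved, stated in full; the proofs are below) =====
def Claim_equal_removeMatchesInRow_py : Prop := ∀ (matchLength : Int) (row : List (Option Int)), Dom_removeMatchesInRow_py matchLength row → Spec_removeMatchesInRow_py matchLength row (removeMatchesInRow_py matchLength row)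

-- ===== LEMMAS AND PROOFS =====

-- canonical run-by-run description both ports are proved equal to
def runsF (m : Int) : List (Option Int) → List (Option Int)
  | [] => []
  | c :: cs =>
    (if ((cs.takeWhile (· = c)).length + 1 : Int) = m then
       List.replicate m.toNat none
     else c :: cs.takeWhile (· = c)) ++ runsF m (cs.dropWhile (· = c))
termination_by l => l.length
decreasing_by
  simpa using Nat.lt_succ_of_le (List.length_dropWhile_le _ _)

theorem takeWhile_replicate_append (c : Option Int) (rest : List (Option Int))
    (h : ∀ x, rest.head? = some x → x ≠ c) :
    ∀ q, (List.replicate q c ++ rest).takeWhile (· = c) = List.replicate q c ∧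
         (List.replicate q c ++ rest).dropWhile (· = c) = rest := by
  intro q
  induction q with
  | zero =>
    simp only [List.replicate, List.nil_append]
    cases rest with
    | nil => simp
    | cons x xs =>
      have hx : ¬ (x = c) := h x rfl
      constructor <;> simp [List.takeWhile, List.dropWhile, hx]
  | succ n ih =>
    simp only [List.replicate_succ, List.cons_append, List.takeWhile, List.dropWhile]
    simp [ih]

theorem runsF_run (m : Int) (c : Option Int) (q : Nat) (hq : 1 ≤ q)
    (rest : List (Option Int)) (h : ∀ x, rest.head? = some x → x ≠ c) :
    runsF m (List.replicate q c ++ rest) =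
      (if (q : Int) = m then List.replicate m.toNat none else List.replicate q c) ++
        runsF m rest := by
  obtain ⟨p, rfl⟩ : ∃ p, q = p + 1 := ⟨q - 1, by omega⟩
  have hdec := takeWhile_replicate_append c rest h p
  rw [List.replicate_succ, List.cons_append, runsF]
  rw [hdec.1, hdec.2]
  have hl : ((List.replicate p c).length + 1 : Int) = ((p + 1 : Nat) : Int) := by
    simp
  rw [hl]

-- ---- A = runsF ----

theorem main_invA (m : Int) (rest : List (Option Int)) :
    ∀ (res : List (Option Int)) (tgt : Option Int) (q : Nat), 1 ≤ q →
      aFin m (rest.foldl (aStep m) (res, tgt, List.replicate q tgt)) =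
        res ++ runsF m (List.replicate q tgt ++ rest) := by
  induction rest with
  | nil =>
    intro res tgt q hq
    rw [List.foldl_nil, runsF_run m tgt q hq [] (by simp)]
    simp only [aFin, List.length_replicate]
    split_ifs with hm <;> simp [runsF]
  | cons c rest ih =>
    intro res tgt q hq
    rw [List.foldl_cons]
    by_cases hc : c = tgt
    · subst hc
      have hstep : aStep m (res, c, List.replicate q c) c = (res, c, List.replicate (q + 1) c) := by
        simp [aStep, List.replicate_succ' (n := q)]
      rw [hstep, ih res c (q + 1) (by omega)]
      have : List.replicate (q + 1) c ++ rest = List.replicate q c ++ c :: rest := by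
        simp [List.replicate_succ' (n := q)]
      rw [this]
    · have hstep : aStep m (res, tgt, List.replicate q tgt) c =
          ((if (q : Int) = m then res ++ List.replicate m.toNat none
            else res ++ List.replicate q tgt), c, [c]) := by
        simp [aStep, hc]
      rw [hstep]
      have h1 : ([c] : List (Option Int)) = List.replicate 1 c := by simp
      rw [h1, ih _ c 1 (by omega)]
      rw [runsF_run m tgt q hq (c :: rest) (by intro x hx; simp at hx; subst hx; exact hc)]
      simp only [List.replicate_one, List.singleton_append]
      split_ifs <;> simp

theorem A_eq_runsF (m : Int) (row : List (Option Int)) :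
    removeMatchesInRow_py m row = runsF m row := by
  cases row with
  | nil =>
    simp only [removeMatchesInRow_py, List.foldl_nil, aFin, runsF]
    split_ifs with h
    · have : m.toNat = 0 := by simp at h; omega
      simp [this]
    · simp
  | cons c rest =>
    simp only [removeMatchesInRow_py, List.foldl_cons]
    have hstep : aStep m ([], none, []) c = ([], c, [c]) := by
      by_cases hc : c = none
      · subst hc; simp [aStep]
      · simp only [aStep, if_neg hc, List.length_nil, Nat.cast_zero]
        split_ifs with h
        · have : m.toNat = 0 := by omega
          simp [this]
        · simp
    rw [hstep]
    have h1 : ([c] : List (Option Int)) = List.replicate 1 c := by simp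
    rw [h1]
    have := main_invA m rest [] c 1 (by omega)
    rw [this]
    simp [List.replicate_one]

-- ---- B = runsF ----

theorem leftsGo_run (c : Option Int) (rest : List (Option Int))
    (h : ∀ x, rest.head? = some x → x ≠ c) :
    ∀ (i j : Nat), leftsGo c (j + 1) (List.replicate i c ++ rest) =
      List.range' (j + 2) i ++ lefts rest := by
  intro i
  induction i generalizing rest h with
  | zero =>
    intro j
    simp only [List.replicate_zero, List.nil_append, List.range', List.nil_append]
    cases rest with
    | nil => rfl
    | cons x xs =>
      have hx : ¬ (x = c) := h x rfl
      simp [leftsGo, lefts, hx]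
  | succ n ih =>
    intro j
    simp only [List.replicate_succ, List.cons_append, leftsGo, if_pos]
    rw [ih rest h (j + 1)]
    rw [show List.range' (j + 2) (n + 1) = (j + 2) :: List.range' (j + 3) n from List.range'_succ ..]
    rfl

theorem lefts_run (c : Option Int) (q : Nat) (hq : 1 ≤ q) (rest : List (Option Int))
    (h : ∀ x, rest.head? = some x → x ≠ c) :
    lefts (List.replicate q c ++ rest) = List.range' 1 q ++ lefts rest := by
  obtain ⟨p, rfl⟩ : ∃ p, q = p + 1 := ⟨q - 1, by omega⟩
  rw [List.replicate_succ, List.cons_append]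
  simp only [lefts]
  rw [leftsGo_run c rest h p 0]
  have : List.range' 1 (p + 1) = 1 :: List.range' 2 p := List.range'_succ ..
  rw [this]
  rfl

theorem streaks_run (c : Option Int) (q : Nat) (hq : 1 ≤ q) (rest : List (Option Int))
    (h : ∀ x, rest.head? = some x → x ≠ c) :
    streaks (List.replicate q c ++ rest) = (List.range' 1 q).reverse ++ streaks rest := by
  induction q with
  | zero => omega
  | succ n ih =>
    rcases Nat.eq_zero_or_pos n with hn | hn
    · subst hn
      cases rest with
      | nil => simp [streaks, List.range']
      | cons x xs =>
        have hx : ¬ (c = x) := fun hcx => h x rfl hcx.symm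
        simp [streaks, hx, List.range']
    · obtain ⟨p, rfl⟩ : ∃ p, n = p + 1 := ⟨n - 1, by omega⟩
      have hrec := ih hn
      rw [show List.replicate (p + 1 + 1) c ++ rest = c :: c :: (List.replicate p c ++ rest) by
            simp [List.replicate_succ]]
      rw [show (List.replicate (p + 1) c ++ rest : List (Option Int)) =
            c :: (List.replicate p c ++ rest) by simp [List.replicate_succ]] at hrec
      have hsplit : (List.range' 1 (p + 1)).reverse = (1 + p) :: (List.range' 1 p).reverse := by
        rw [show List.range' 1 (p + 1) = List.range' 1 p ++ [1 + p] by
              simpa using List.range'_concat (s := 1) (n := p) (step := 1)]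
        rw [List.reverse_append]; rfl
      rw [streaks, hrec, if_pos rfl, hsplit]
      rw [show List.range' 1 (p + 1 + 1) = List.range' 1 (p + 1) ++ [1 + (p + 1)] by
            simpa using List.range'_concat (s := 1) (n := p + 1) (step := 1)]
      rw [List.reverse_append, hsplit]
      simp [Nat.add_comm]

theorem zip_run_block (m : Int) (c : Option Int) :
    ∀ (n a b : Nat),
      List.zipWith (bCell m) (List.replicate n c)
          ((List.range' (a + 1) n).zip ((List.range' (b + 1) n).reverse)) =
        List.replicate n (if ((a + b + n : Nat) : Int) = m then none else c) := by
  intro n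
  induction n with
  | zero => intro a b; simp
  | succ k ih =>
    intro a b
    have h1 : List.range' (a + 1) (k + 1) = (a + 1) :: List.range' (a + 2) k :=
      List.range'_succ ..
    have h2 : (List.range' (b + 1) (k + 1)).reverse =
        (b + 1 + k) :: (List.range' (b + 1) k).reverse := by
      have : List.range' (b + 1) (k + 1) = List.range' (b + 1) k ++ [b + 1 + k] := by
        simpa using List.range'_concat (s := b + 1) (n := k) (step := 1)
      rw [this, List.reverse_append]; rfl
    rw [List.replicate_succ, h1, h2]
    simp only [List.zip_cons_cons, List.zipWith_cons_cons]
    rw [ih (a + 1) b]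
    have hc : bCell m c (a + 1, b + 1 + k) =
        (if ((a + b + (k + 1) : Nat) : Int) = m then none else c) := by
      simp only [bCell]
      have : (a + 1) + (b + 1 + k) - 1 = a + b + (k + 1) := by omega
      rw [this]
    rw [hc]
    have : a + 1 + b + k = a + b + (k + 1) := by omega
    rw [this]
    rfl

theorem B_eq_runsF (m : Int) (row : List (Option Int)) :
    removeMatchesInRow_py_alt m row = runsF m row := by
  induction hn : row.length using Nat.strong_induction_on generalizing row with
  | _ n ih =>
    cases row with
    | nil => simp [removeMatchesInRow_py_alt, lefts, streaks, runsF]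
    | cons c cs =>
      set t := cs.takeWhile (· = c) with ht
      set rest := cs.dropWhile (· = c) with hrest
      have htr : t = List.replicate t.length c := by
        apply List.eq_replicate_of_mem
        intro x hx
        have := List.mem_takeWhile_imp (ht ▸ hx)
        simpa using this
      have hdecomp : c :: cs = List.replicate (t.length + 1) c ++ rest := by
        rw [List.replicate_succ, List.cons_append, ← htr]
        rw [ht, hrest, List.takeWhile_append_dropWhile]
      have hhead : ∀ x, rest.head? = some x → x ≠ c := by
        intro x hx
        have := List.head?_dropWhile_not (· = c) cs
        rw [← hrest, hx] at this
        simpa using this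
      have hq : 1 ≤ t.length + 1 := by omega
      have hlen : rest.length < n := by
        rw [← hn]
        have h2 := List.length_dropWhile_le (· = c) cs
        rw [← hrest] at h2
        simp only [List.length_cons]
        omega
      rw [hdecomp]
      set q := t.length + 1 with hqdef
      rw [runsF_run m c q hq rest hhead]
      unfold removeMatchesInRow_py_alt
      rw [lefts_run c q hq rest hhead, streaks_run c q hq rest hhead]
      have hzip : (List.range' 1 q ++ lefts rest).zip
            ((List.range' 1 q).reverse ++ streaks rest) =
          (List.range' 1 q).zip ((List.range' 1 q).reverse) ++
            (lefts rest).zip (streaks rest) :=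
        List.zip_append (by simp)
      rw [hzip]
      have hzw : List.zipWith (bCell m)
            (List.replicate q c ++ rest)
            ((List.range' 1 q).zip ((List.range' 1 q).reverse) ++
              (lefts rest).zip (streaks rest)) =
          List.zipWith (bCell m) (List.replicate q c)
              ((List.range' 1 q).zip ((List.range' 1 q).reverse)) ++
            List.zipWith (bCell m) rest ((lefts rest).zip (streaks rest)) := by
        apply List.zipWith_append
        simp [List.length_zip, List.length_range']
      rw [hzw]
      have hblock := zip_run_block m c q 0 0
      simp only [Nat.zero_add] at hblock
      rw [hblock]
      have hrec : List.zipWith (bCell m) rest ((lefts rest).zip (streaks rest)) =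
          runsF m rest := by
        have := ih rest.length hlen rest rfl
        simpa [removeMatchesInRow_py_alt] using this
      rw [hrec]
      congr 1
      split_ifs with hm
      · have : m.toNat = q := by omega
        simp [this]
      · simp

-- ===== VERDICT (by name: the statement is the Claim_ definition above) =====
theorem removeMatchesInRow_py_spec : Claim_equal_removeMatchesInRow_py := by
  intro m row _
  unfold Spec_removeMatchesInRow_py
  rw [A_eq_runsF, B_eq_runsF]
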